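-- pv_equiv track=rewrite | github.com/GIftSibusiso/Beginner-exercises | team_allocator.py | virtual_teams
-- ===== SOURCE A (Python) =====
-- def space_maker(string):
--     output = ""
--     for i in string:
--         if i != " ":
--             output += i
--     return output
--
-- def virtual_teams(virtual_students_list):
--     '''
--     from the list of virtual_students above,  create list of 4 students per team, and add them to
--         one big list
--     '''
--     virtual_teams = []
--     team = []
--
--     for students in virtual_students_list:
--         if len(team) == 4:
--             virtual_teams.append(team)
--             team = []
--         team.append(space_maker(students).lower())
--
--     if len(team) > 0:
--         virtual_teams.append(team)
--
--     return virtual_teams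
-- ===== SOURCE B (Python) =====
-- def virtual_teams(virtual_students_list):
--     cleaned = [s.replace(' ', '').lower() for s in virtual_students_list]
--     return [cleaned[i:i + 4] for i in range(0, len(cleaned), 4)]
-- ===== Notes on version B (the rewrite author's own statement) =====
-- stated objective: simpler
-- what changed: Replaces A's running team buffer with its len==4 flush branch and trailing flush by a two-phase normalize-then-slice: one comprehension cleans every name (str.replace instead of a per-character accumulator loop), then index slicing chunks the cleaned list in groups of 4 with no maintained accumulator.
import Mathlib
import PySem

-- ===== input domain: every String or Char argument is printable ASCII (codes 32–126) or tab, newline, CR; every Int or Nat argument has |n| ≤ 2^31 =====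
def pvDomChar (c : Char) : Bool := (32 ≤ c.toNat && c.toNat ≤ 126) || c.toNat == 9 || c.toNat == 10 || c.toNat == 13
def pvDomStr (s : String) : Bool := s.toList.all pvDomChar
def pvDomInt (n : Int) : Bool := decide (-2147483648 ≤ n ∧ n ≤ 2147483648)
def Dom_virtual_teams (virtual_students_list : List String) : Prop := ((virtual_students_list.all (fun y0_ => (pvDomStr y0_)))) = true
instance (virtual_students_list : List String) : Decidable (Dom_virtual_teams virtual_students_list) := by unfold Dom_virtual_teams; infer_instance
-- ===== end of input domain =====

-- B replaces A's running team buffer and flush branches with a normalize-then-slice two-phase decomposition (objective: simpler).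

-- ===== PORT A =====
-- helper space_maker: character loop appending non-space characters to an accumulator string
def space_maker (string : String) : String :=
  String.ofList (string.toList.foldl (fun output i => if i ≠ ' ' then output ++ [i] else output) [])

def virtual_teams (virtual_students_list : List String) : List (List String) :=
  let st := virtual_students_list.foldl
    (fun (p : List (List String) × List String) students =>
      let p := if p.2.length == 4 then (p.1 ++ [p.2], ([] : List String)) else p
      (p.1, p.2 ++ [PySem.Str.lower (space_maker students)]))
    ([], [])
  if st.2.length > 0 then st.1 ++ [st.2] else st.1

-- ===== PORT B =====
def virtual_teams_alt (virtual_students_list : List String) : List (List String) :=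
  let cleaned := virtual_students_list.map (fun s => PySem.Str.lower (PySem.Str.replace s " " ""))
  (PySem.List.pyRange 0 (cleaned.length : Int) 4).map
    (fun i => PySem.List.slice cleaned (some i) (some (i + 4)))

-- ===== PRECONDITION & SPEC =====
def Spec_virtual_teams (virtual_students_list : List String) (out : List (List String)) : Prop := out = virtual_teams_alt virtual_students_list
instance (virtual_students_list : List String) (out : List (List String)) : Decidable (Spec_virtual_teams virtual_students_list out) := by unfold Spec_virtual_teams; infer_instance

-- ===== CLAIM (what is proved, stated in full; the proofs are below) =====
def Claim_equal_virtual_teams : Prop := ∀ (virtual_students_list : List String), Dom_virtual_teams virtual_students_list → Spec_virtual_teams virtual_students_list (virtual_teams virtual_students_list)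

-- ===== LEMMAS AND PROOFS =====

-- chunks of 4: the common characterisation both ports are reduced to
def chunks4 {α : Type} (xs : List α) : List (List α) :=
  if h : xs = [] then ([] : List (List α)) else xs.take 4 :: chunks4 (xs.drop 4)
termination_by xs.length
decreasing_by
  cases xs with
  | nil => exact absurd rfl h
  | cons a t => simp only [List.length_drop, List.length_cons]; omega

-- the filter loop of space_maker
lemma foldl_filter_space (l acc : List Char) :
    l.foldl (fun output i => if i ≠ ' ' then output ++ [i] else output) acc
      = acc ++ l.filter (fun c => c ≠ ' ') := by
  induction l generalizing acc with
  | nil => simp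
  | cons c t ih =>
    rw [List.foldl_cons, ih]
    by_cases hc : c = ' ' <;> simp [hc]

lemma replace_go_space (l acc : List Char) (fuel : ℕ) (h : l.length ≤ fuel) :
    PySem.Chars.replace.go [' '] [] fuel l acc
      = acc.reverse ++ l.filter (fun c => c ≠ ' ') := by
  induction l generalizing fuel acc with
  | nil => cases fuel <;> simp [PySem.Chars.replace.go]
  | cons c t ih =>
    cases fuel with
    | zero => simp at h
    | succ f =>
      by_cases hc : c = ' '
      · rw [PySem.Chars.replace.go]
        simp only [hc, List.isPrefixOf]
        simp [ih acc f (by simpa using h)]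
      · rw [PySem.Chars.replace.go]
        have : ¬ ([' '].isPrefixOf (c :: t) = true) := by
          simp [List.isPrefixOf]; intro hh; exact hc (hh ▸ rfl)
        simp only [if_neg this]
        rw [ih (c :: acc) f (by simpa using h)]
        simp [hc]

lemma space_maker_eq_replace (s : String) :
    space_maker s = PySem.Str.replace s " " "" := by
  have h1 : (space_maker s).toList = s.toList.filter (fun c => c ≠ ' ') := by
    unfold space_maker
    rw [foldl_filter_space]
    simp
  have h2 : (PySem.Str.replace s " " "").toList = s.toList.filter (fun c => c ≠ ' ') := by
    rw [PySem.Str.toList_replace]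
    show PySem.Chars.replace s.toList [' '] [] = _
    rw [PySem.Chars.replace]
    rw [if_neg (by decide)]
    rw [replace_go_space s.toList [] s.toList.length (le_refl _)]
    simp
  have := h1.trans h2.symm
  exact String.toList_inj.mp this

-- short lists are a single chunk
lemma chunks4_short {α : Type} (xs : List α) (h0 : xs ≠ []) (h4 : xs.length ≤ 4) :
    chunks4 xs = [xs] := by
  rw [chunks4]
  simp [h0, List.take_of_length_le h4, List.drop_eq_nil_of_le h4, chunks4]

lemma chunks4_append4 {α : Type} (a b : List α) (ha : a.length = 4) :
    chunks4 (a ++ b) = a :: chunks4 b := by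
  rw [chunks4]
  have hne : a ++ b ≠ [] := by
    intro h; have := congrArg List.length h; simp [ha] at this
  rw [dif_neg hne, List.take_left' ha, List.drop_left' ha]

-- A's loop step, named (proof-side; definitionally the lambda in the port of A)
def stepA (p : List (List String) × List String) (students : String) :
    List (List String) × List String :=
  let p := if p.2.length == 4 then (p.1 ++ [p.2], ([] : List String)) else p
  (p.1, p.2 ++ [PySem.Str.lower (space_maker students)])

-- A's loop invariant: a partial team of ≤ 4 names plus the rest, chunked in 4s
lemma A_inv (ys : List String) (acc : List (List String)) (team : List String)
    (h : team.length ≤ 4) :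
    (if (ys.foldl stepA (acc, team)).2.length > 0
      then (ys.foldl stepA (acc, team)).1 ++ [(ys.foldl stepA (acc, team)).2]
      else (ys.foldl stepA (acc, team)).1)
      = acc ++ chunks4 (team ++ ys.map (fun s => PySem.Str.lower (space_maker s))) := by
  induction ys generalizing acc team with
  | nil =>
    cases team with
    | nil => simp [chunks4]
    | cons a t =>
      simp only [List.foldl_nil, List.map_nil, List.append_nil]
      rw [chunks4_short _ (by simp) h]
      simp
  | cons y t ih =>
    by_cases h4 : team.length = 4
    · have hstep : stepA (acc, team) y = (acc ++ [team], [PySem.Str.lower (space_maker y)]) := by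
        simp [stepA, h4]
      rw [List.foldl_cons, hstep, ih _ _ (by simp)]
      rw [show team ++ (y :: t).map (fun s => PySem.Str.lower (space_maker s))
            = team ++ ([PySem.Str.lower (space_maker y)] ++ t.map (fun s => PySem.Str.lower (space_maker s))) by simp]
      rw [chunks4_append4 team _ h4]
      simp
    · have hstep : stepA (acc, team) y = (acc, team ++ [PySem.Str.lower (space_maker y)]) := by
        simp [stepA, h4]
      rw [List.foldl_cons, hstep, ih _ _ (by simp; omega)]
      simp

-- B reduced to chunks4
lemma B_chunks {α : Type} (xs : List α) :
    (PySem.List.pyRange 0 (xs.length : Int) 4).map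
        (fun i => PySem.List.slice xs (some i) (some (i + 4)))
      = (List.range ((xs.length + 3) / 4)).map (fun k => (xs.drop (4 * k)).take 4) := by
  rw [PySem.List.pyRange_of_pos 0 (xs.length : Int) (by norm_num)]
  rw [List.map_map]
  have hm : (if (0:Int) < (xs.length : Int) then (((xs.length : Int) - 0 + 4 - 1) / 4).toNat else 0)
      = (xs.length + 3) / 4 := by
    split_ifs with hp
    · omega
    · omega
  rw [hm]
  apply List.map_congr_left
  intro k _
  simp only [Function.comp]
  rw [PySem.List.slice_toNat xs (by positivity) (by positivity)]
  rw [show ((0:Int) + 4 * (k:Int)).toNat = 4 * k from by omega,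
      show ((0:Int) + 4 * (k:Int) + 4).toNat = 4 * k + 4 from by omega,
      show 4 * k + 4 - 4 * k = 4 from by omega]

lemma chunks4_eq_range {α : Type} (xs : List α) :
    chunks4 xs = (List.range ((xs.length + 3) / 4)).map (fun k => (xs.drop (4 * k)).take 4) := by
  induction xs using chunks4.induct with
  | case1 => simp [chunks4]
  | case2 xs hnil ih =>
    rw [chunks4, dif_neg hnil, ih]
    have hlen : 0 < xs.length := List.length_pos_of_ne_nil hnil
    have hm : (xs.length + 3) / 4 = ((xs.drop 4).length + 3) / 4 + 1 := by
      simp only [List.length_drop]; omega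
    rw [hm, List.range_succ_eq_map, List.map_cons, List.map_map]
    congr 1
    simp only [List.map_inj_left, Function.comp_apply, List.drop_drop]
    intro a _
    congr 2
    omega

-- ===== VERDICT (by name: the statement is the Claim_ definition above) =====
theorem virtual_teams_spec : Claim_equal_virtual_teams := by
  intro xs _
  unfold Spec_virtual_teams virtual_teams_alt
  have hmap : xs.map (fun s => PySem.Str.lower (PySem.Str.replace s " " ""))
      = xs.map (fun s => PySem.Str.lower (space_maker s)) := by
    apply List.map_congr_left; intro s _; rw [space_maker_eq_replace]
  rw [hmap]
  have hB := B_chunks (xs.map (fun s => PySem.Str.lower (space_maker s)))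
  rw [hB, ← chunks4_eq_range]
  show (if (xs.foldl stepA ([], [])).2.length > 0
      then (xs.foldl stepA ([], [])).1 ++ [(xs.foldl stepA ([], [])).2]
      else (xs.foldl stepA ([], [])).1) = _
  have hA := A_inv xs [] [] (by simp)
  simpa using hA
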